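-- pv_equiv track=rewrite | github.com/bcaudillo/data_science | pythonAssessment.py | identify_most_common_word
-- ===== SOURCE A (Python) =====
-- def identify_most_common_word(paragraph):
--     if not paragraph:
--         return None
--
--     words = paragraph.split()
--     word_counts = {}
--     most_common = ""
--     highest_count = 0
--
--     for word in words:
--         word_counts[word] = word_counts.get(word, 0) + 1
--         if word_counts[word] > highest_count:
--             most_common = word
--             highest_count = word_counts[word]
--
--     return most_common
-- ===== SOURCE B (Python) =====
-- def identify_most_common_word(paragraph):
--     if not paragraph:
--         return None
--
--     counts = {}
--     for word in paragraph.split():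
--         counts[word] = counts.get(word, 0) + 1
--
--     most_common = ""
--     highest_count = 0
--     for word, count in counts.items():
--         if count > highest_count:
--             most_common = word
--             highest_count = count
--
--     return most_common
-- ===== Notes on version B (the rewrite author's own statement) =====
-- stated objective: alternative
-- what changed: B builds the complete word-frequency table in one pass and then scans the table for its maximum, replacing A's fused count-and-track loop; on tied maxima B therefore returns the first-appearing word instead of A's first-to-reach-the-count word.
-- intended difference: On paragraphs whose maximal word count is tied and the tied word appearing first is not the tied word whose occurrences complete first, A returns the word whose running count reaches the maximum first while B returns the first-appearing word with the maximal count, the conventional tie-break and the intended value. — e.g. on identify_most_common_word(some "a b b a"): A returns some "b", B returns some "a"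
import Mathlib
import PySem

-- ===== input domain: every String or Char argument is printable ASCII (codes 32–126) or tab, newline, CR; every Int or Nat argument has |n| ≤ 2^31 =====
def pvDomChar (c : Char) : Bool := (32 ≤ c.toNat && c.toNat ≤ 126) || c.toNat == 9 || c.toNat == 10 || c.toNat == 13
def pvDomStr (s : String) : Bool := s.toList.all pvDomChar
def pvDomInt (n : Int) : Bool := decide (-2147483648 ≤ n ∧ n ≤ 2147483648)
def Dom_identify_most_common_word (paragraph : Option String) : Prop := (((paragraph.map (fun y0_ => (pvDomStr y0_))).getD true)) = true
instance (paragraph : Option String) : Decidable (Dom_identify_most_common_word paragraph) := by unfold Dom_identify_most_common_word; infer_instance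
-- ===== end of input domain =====

-- B re-implements A in two phases (build the full word-frequency table, then scan the table
-- for its maximum) instead of A's fused count-and-track pass; on tied maxima B returns the
-- first-appearing word, the conventional tie-break, where A returns the word whose running
-- count reaches the maximum first (stated as the intended difference D_ below).

-- ===== PORT A =====
-- A's 'for word in words' loop, state (word_counts, most_common, highest_count)
def pvLoopA : PySem.Dict String Int → String → Int → List String → String
  | _, mc, _, [] => mc
  | d, mc, hc, word :: rest =>
    let c := d.getD word 0 + 1
    let d' := d.insert word c
    if hc < c then pvLoopA d' word c rest else pvLoopA d' mc hc rest

def identify_most_common_word (paragraph : Option String) : Option String :=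
  match paragraph with
  | none => none
  | some p =>
    if p = "" then none
    else some (pvLoopA PySem.Dict.empty "" 0 (PySem.Str.split₀ p))

-- ===== PORT B =====
-- B's second loop: 'for word, count in counts.items()' tracking (most_common, highest_count)
def pvScanB : String → Int → List (String × Int) → String
  | mc, _, [] => mc
  | mc, hc, (w, c) :: rest => if hc < c then pvScanB w c rest else pvScanB mc hc rest

def identify_most_common_word_alt (paragraph : Option String) : Option String :=
  match paragraph with
  | none => none
  | some p =>
    if p = "" then none
    else
      let counts := (PySem.Str.split₀ p).foldl (fun d w => d.insert w (d.getD w 0 + 1)) PySem.Dict.empty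
      some (pvScanB "" 0 counts.items)

-- ===== PRECONDITION & SPEC =====
-- On paragraphs where the maximal word count is tied and the tied word that appears first (u) is
-- not the tied word whose occurrences complete first (v, earliest last occurrence), A returns v
-- (the word whose running count reaches the maximum first) while B returns u, the first-appearing
-- word with the maximal count — the conventional tie-break and the intended value.
def D_identify_most_common_word (paragraph : Option String) : Prop :=
  let ws := PySem.Str.split₀ paragraph.iget
  ∃ u ∈ ws, ∃ v ∈ ws, ws.count u = ws.count v ∧ ws.reverse.idxOf u < ws.reverse.idxOf v ∧
    ∀ w ∈ ws, ws.count w ≤ ws.count u ∧ (ws.count w = ws.count u → ws.idxOf u ≤ ws.idxOf w)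
instance (paragraph : Option String) : Decidable (D_identify_most_common_word paragraph) := by
  unfold D_identify_most_common_word; infer_instance

def Spec_identify_most_common_word (paragraph : Option String) (out : Option String) : Prop :=
  ¬ D_identify_most_common_word paragraph → out = identify_most_common_word_alt paragraph
instance (paragraph : Option String) (out : Option String) : Decidable (Spec_identify_most_common_word paragraph out) := by unfold Spec_identify_most_common_word; infer_instance

def pvDiffWitness_identify_most_common_word : Option String := some "a b b a"
def pvDiffWitnessOut_identify_most_common_word : (Option String) × (Option String) := (some "b", some "a")

-- ===== CLAIM (what is proved, stated in full; the proofs are below) =====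
def Claim_unchanged_identify_most_common_word : Prop := ∀ (paragraph : Option String), Dom_identify_most_common_word paragraph → Spec_identify_most_common_word paragraph (identify_most_common_word paragraph)
def Claim_changed_identify_most_common_word : Prop := Dom_identify_most_common_word (pvDiffWitness_identify_most_common_word) ∧ D_identify_most_common_word (pvDiffWitness_identify_most_common_word) ∧ identify_most_common_word (pvDiffWitness_identify_most_common_word) = pvDiffWitnessOut_identify_most_common_word.1 ∧ identify_most_common_word_alt (pvDiffWitness_identify_most_common_word) = pvDiffWitnessOut_identify_most_common_word.2 ∧ pvDiffWitnessOut_identify_most_common_word.1 ≠ pvDiffWitnessOut_identify_most_common_word.2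
def Claim_exact_identify_most_common_word : Prop := ∀ (paragraph : Option String), Dom_identify_most_common_word paragraph → D_identify_most_common_word paragraph → identify_most_common_word paragraph ≠ identify_most_common_word_alt paragraph

-- ===== LEMMAS AND PROOFS =====

-- the maximal number of occurrences of any word (0 for the empty list)
def pvMaxCount (ws : List String) : Nat := (ws.map (fun w => ws.count w)).foldr max 0

-- proof-side spec of A's tracking: the first word whose running count reaches m
def pvLoopB : PySem.Dict String Int → Int → List String → Option String
  | _, _, [] => none
  | d, m, w :: rest =>
    let c := d.getD w 0 + 1
    if c = m then some w else pvLoopB (d.insert w c) m rest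

-- max running count along ws, counts taken relative to the already-processed prefix q
def pvMaxrc : List String → List String → Int
  | _, [] => 0
  | q, w :: ws => max ((q.count w : Int) + 1) (pvMaxrc (q ++ [w]) ws)

theorem pvMaxrc_nonneg : ∀ (ws q : List String), 0 ≤ pvMaxrc q ws := by
  intro ws
  induction ws with
  | nil => intro q; simp [pvMaxrc]
  | cons w ws ih =>
    intro q
    have := ih (q ++ [w])
    simp [pvMaxrc]
    omega

theorem count_le_pvMaxrc : ∀ (ws q : List String) (v : String), v ∈ ws →
    (((q ++ ws).count v : Int)) ≤ pvMaxrc q ws := by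
  intro ws
  induction ws with
  | nil => intro q v hv; simp at hv
  | cons w ws ih =>
    intro q v hv
    by_cases hmem : v ∈ ws
    · have := ih (q ++ [w]) v hmem
      simp only [pvMaxrc]
      have : ((q ++ w :: ws).count v : Int) = (((q ++ [w]) ++ ws).count v : Int) := by
        rw [List.append_assoc]; simp
      rw [this]
      have h2 := ih (q ++ [w]) v hmem
      omega
    · have hv' : v = w := by
        rcases List.mem_cons.mp hv with h | h
        · exact h
        · exact absurd h hmem
      subst hv'
      have hz : ws.count v = 0 := List.count_eq_zero.mpr hmem
      simp only [pvMaxrc]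
      have : (q ++ v :: ws).count v = q.count v + 1 := by
        simp [List.count_append, hz]
      rw [this]
      omega

theorem pvMaxrc_achieved : ∀ (ws q : List String), ws ≠ [] →
    ∃ v ∈ ws, pvMaxrc q ws = (((q ++ ws).count v : Int)) := by
  intro ws
  induction ws with
  | nil => intro q h; exact absurd rfl h
  | cons w ws ih =>
    intro q _
    by_cases hws : ws = []
    · subst hws
      refine ⟨w, by simp, ?_⟩
      simp [pvMaxrc, List.count_append]
      omega
    · obtain ⟨v, hv, heq⟩ := ih (q ++ [w]) hws
      by_cases hle : (q.count w : Int) + 1 ≤ pvMaxrc (q ++ [w]) ws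
      · refine ⟨v, List.mem_cons_of_mem _ hv, ?_⟩
        simp only [pvMaxrc]
        rw [List.append_assoc] at heq
        simp at heq ⊢
        omega
      · have hnot : w ∉ ws := by
          intro hm
          have := count_le_pvMaxrc ws (q ++ [w]) w hm
          have hcnt : (((q ++ [w]) ++ ws).count w : Int) = (q.count w : Int) + 1 + (ws.count w : Int) := by
            simp [List.count_append]; ring
          have hge : 1 ≤ (ws.count w : Int) := by
            have := List.count_pos_iff.mpr hm
            omega
          omega
        refine ⟨w, List.mem_cons_self, ?_⟩
        have hz : ws.count w = 0 := List.count_eq_zero.mpr hnot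
        simp only [pvMaxrc]
        have : (q ++ w :: ws).count w = q.count w + 1 := by
          simp [List.count_append, hz]
        rw [this]
        push_cast
        omega

theorem pvMain : ∀ (ws : List String) (dA dB : PySem.Dict String Int) (q : List String)
    (mc : String) (hc : Int),
    (∀ v, dA.getD v 0 = (q.count v : Int)) →
    (∀ v, dB.getD v 0 = (q.count v : Int)) →
    0 ≤ hc → (∀ v, (q.count v : Int) ≤ hc) →
    (hc < pvMaxrc q ws → pvLoopB dB (pvMaxrc q ws) ws = some (pvLoopA dA mc hc ws)) ∧
    (¬ hc < pvMaxrc q ws → pvLoopA dA mc hc ws = mc) := by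
  intro ws
  induction ws with
  | nil =>
    intro dA dB q mc hc hdA hdB hnn hinv
    constructor
    · intro h; simp [pvMaxrc] at h; omega
    · intro _; simp [pvLoopA]
  | cons w rest ih =>
    intro dA dB q mc hc hdA hdB hnn hinv
    have hcw : dA.getD w 0 = (q.count w : Int) := hdA w
    have hcwB : dB.getD w 0 = (q.count w : Int) := hdB w
    have hdA' : ∀ v, (dA.insert w ((q.count w : Int) + 1)).getD v 0 = ((q ++ [w]).count v : Int) := by
      intro v
      rw [PySem.Dict.getD_insert]
      by_cases hv : v = w
      · subst hv; simp [List.count_append]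
      · simp [hv, hdA v, List.count_append, Ne.symm hv]
    have hdB' : ∀ v, (dB.insert w ((q.count w : Int) + 1)).getD v 0 = ((q ++ [w]).count v : Int) := by
      intro v
      rw [PySem.Dict.getD_insert]
      by_cases hv : v = w
      · subst hv; simp [List.count_append]
      · simp [hv, hdB v, List.count_append, Ne.symm hv]
    simp only [pvLoopA, pvLoopB, pvMaxrc, hcw, hcwB]
    by_cases hbr : hc < (q.count w : Int) + 1
    · rw [if_pos hbr]
      have hinv' : ∀ v, ((q ++ [w]).count v : Int) ≤ (q.count w : Int) + 1 := by
        intro v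
        by_cases hv : v = w
        · subst hv; simp [List.count_append]
        · have := hinv v
          simp [List.count_append, Ne.symm hv]
          omega
      obtain ⟨ih1, ih2⟩ := ih (dA.insert w ((q.count w : Int) + 1)) (dB.insert w ((q.count w : Int) + 1))
        (q ++ [w]) w ((q.count w : Int) + 1) hdA' hdB' (by positivity) hinv'
      constructor
      · intro _
        by_cases hR : (q.count w : Int) + 1 < pvMaxrc (q ++ [w]) rest
        · rw [max_eq_right (le_of_lt hR)]
          rw [if_neg (by omega)]
          exact ih1 hR
        · rw [max_eq_left (by omega)]
          rw [if_pos rfl]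
          rw [ih2 hR]
      · intro hn
        exfalso
        have := le_max_left ((q.count w : Int) + 1) (pvMaxrc (q ++ [w]) rest)
        omega
    · rw [if_neg hbr]
      have hinv' : ∀ v, ((q ++ [w]).count v : Int) ≤ hc := by
        intro v
        by_cases hv : v = w
        · subst hv; simp [List.count_append]; omega
        · have := hinv v
          simp [List.count_append, Ne.symm hv]
          omega
      obtain ⟨ih1, ih2⟩ := ih (dA.insert w ((q.count w : Int) + 1)) (dB.insert w ((q.count w : Int) + 1))
        (q ++ [w]) mc hc hdA' hdB' hnn hinv'
      constructor
      · intro h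
        have hR : hc < pvMaxrc (q ++ [w]) rest := by
          rcases max_cases ((q.count w : Int) + 1) (pvMaxrc (q ++ [w]) rest) with ⟨he, _⟩ | ⟨he, _⟩ <;> omega
        rw [max_eq_right (by omega)]
        rw [if_neg (by omega)]
        exact ih1 hR
      · intro hn
        have hR : ¬ hc < pvMaxrc (q ++ [w]) rest := by
          have := le_max_right ((q.count w : Int) + 1) (pvMaxrc (q ++ [w]) rest)
          omega
        exact ih2 hR

-- pvMaxCount bounds / attainment
theorem pvFoldrMax_le (l : List Nat) (x : Nat) (h : x ∈ l) : x ≤ l.foldr max 0 := by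
  induction l with
  | nil => simp at h
  | cons a t ih =>
    rcases List.mem_cons.mp h with rfl | h
    · simp [List.foldr]
    · simp [List.foldr]; exact Or.inr (ih h)

theorem pvFoldrMax_mem (l : List Nat) (h : l ≠ []) : l.foldr max 0 ∈ l ∨ l.foldr max 0 = 0 := by
  induction l with
  | nil => exact absurd rfl h
  | cons a t ih =>
    by_cases ht : t = []
    · subst ht; simp
    · rcases ih ht with hm | hz
      · rcases Nat.le_total a (t.foldr max 0) with hle | hle
        · rw [List.foldr, max_eq_right hle]; exact Or.inl (List.mem_cons_of_mem _ hm)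
        · rw [List.foldr, max_eq_left hle]; exact Or.inl List.mem_cons_self
      · rw [List.foldr, hz]
        rcases Nat.eq_zero_or_pos a with rfl | hp
        · right; simp
        · rw [max_eq_left (Nat.zero_le a)]; exact Or.inl List.mem_cons_self

theorem le_pvMaxCount : ∀ (ws : List String) (v : String), v ∈ ws → ws.count v ≤ pvMaxCount ws := by
  intro ws v hv
  exact pvFoldrMax_le _ _ (List.mem_map_of_mem hv)

theorem pvMaxCount_achieved : ∀ (ws : List String), ws ≠ [] → ∃ v ∈ ws, pvMaxCount ws = ws.count v := by
  intro ws h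
  rcases pvFoldrMax_mem (ws.map (fun w => ws.count w)) (by simpa using h) with hm | hz
  · rcases List.mem_map.mp hm with ⟨v, hv, he⟩
    exact ⟨v, hv, he.symm⟩
  · exfalso
    rcases List.exists_mem_of_ne_nil ws h with ⟨w, hw⟩
    have h1 : 1 ≤ ws.count w := List.count_pos_iff.mpr hw
    have := pvFoldrMax_le (ws.map (fun w => ws.count w)) (ws.count w) (List.mem_map_of_mem hw)
    unfold pvMaxCount at *
    omega

theorem pvMaxCount_eq_pvMaxrc (ws : List String) (h : ws ≠ []) :
    (pvMaxCount ws : Int) = pvMaxrc [] ws := by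
  obtain ⟨v, hv, hev⟩ := pvMaxrc_achieved ws [] h
  obtain ⟨u, hu, heu⟩ := pvMaxCount_achieved ws h
  have h1 : ((ws.count u : Nat) : Int) ≤ pvMaxrc [] ws := by
    simpa using count_le_pvMaxrc ws [] u hu
  have h2 : ws.count v ≤ pvMaxCount ws := le_pvMaxCount ws v hv
  simp only [List.nil_append] at hev
  omega

-- index characterization of pvLoopB (first index whose running count equals m)
theorem pvLoopB_char : ∀ (rest q : List String) (d : PySem.Dict String Int) (m : Int) (w : String),
    (∀ v, d.getD v 0 = (q.count v : Int)) →
    pvLoopB d m rest = some w →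
    ∃ j < rest.length, rest[j]! = w ∧
      ((q ++ rest.take (j+1)).count w : Int) = m ∧
      ∀ k < j, ((q ++ rest.take (k+1)).count rest[k]! : Int) ≠ m := by
  intro rest
  induction rest with
  | nil => intro q d m w _ h; simp [pvLoopB] at h
  | cons w0 rest ih =>
    intro q d m w hinv h
    simp only [pvLoopB, hinv w0] at h
    by_cases hc : (q.count w0 : Int) + 1 = m
    · rw [if_pos hc] at h
      obtain rfl : w0 = w := by injection h
      refine ⟨0, by simp, by simp, ?_, by omega⟩
      simpa [List.count_append] using hc
    · rw [if_neg hc] at h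
      have hinv' : ∀ v, (d.insert w0 ((q.count w0 : Int) + 1)).getD v 0 = ((q ++ [w0]).count v : Int) := by
        intro v
        rw [PySem.Dict.getD_insert]
        by_cases hv : v = w0
        · subst hv; simp [List.count_append]
        · simp [hv, hinv v, List.count_append, Ne.symm hv]
      obtain ⟨j, hj, hjw, hcnt, hmin⟩ := ih (q ++ [w0]) _ m w hinv' h
      refine ⟨j + 1, by simp; omega, by simpa using hjw, ?_, ?_⟩
      · have he : q ++ (w0 :: rest).take (j + 1 + 1) = (q ++ [w0]) ++ rest.take (j + 1) := by
          simp
        rw [he]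
        exact hcnt
      · intro k hk
        cases k with
        | zero =>
          simpa [List.count_append] using hc
        | succ k' =>
          have hk' : k' < j := by omega
          have := hmin k' hk'
          have he : q ++ (w0 :: rest).take (k' + 1 + 1) = (q ++ [w0]) ++ rest.take (k' + 1) := by
            simp
          rw [he]
          simpa using this

-- pvScanB stays put when nothing exceeds the current best
theorem pvScanB_stay : ∀ (L : List (String × Int)) (mc : String) (hc : Int),
    (∀ p ∈ L, p.2 ≤ hc) → pvScanB mc hc L = mc := by
  intro L
  induction L with
  | nil => intro mc hc _; rfl
  | cons p rest ih =>
    intro mc hc hall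
    obtain ⟨w0, c0⟩ := p
    have h0 : c0 ≤ hc := hall (w0, c0) List.mem_cons_self
    simp only [pvScanB, if_neg (by omega : ¬ hc < c0)]
    exact ih mc hc (fun p hp => hall p (List.mem_cons_of_mem _ hp))

-- pvScanB returns the first key attaining the maximum M of the values
theorem pvScanB_first_max : ∀ (L : List (String × Int)) (mc : String) (hc M : Int) (k : String) (c : Int),
    L.find? (fun p => p.2 == M) = some (k, c) →
    (∀ p ∈ L, p.2 ≤ M) → hc < M →
    pvScanB mc hc L = k := by
  intro L
  induction L with
  | nil => intro mc hc M k c h _ _; simp at h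
  | cons p rest ih =>
    intro mc hc M k c hfind hall hlt
    obtain ⟨w0, c0⟩ := p
    by_cases h0 : c0 = M
    · subst h0
      rw [List.find?_cons_of_pos (by simp)] at hfind
      have hkc : w0 = k ∧ c0 = c := by
        have := Option.some.inj hfind
        exact ⟨congrArg Prod.fst this, congrArg Prod.snd this⟩
      simp only [pvScanB, if_pos hlt]
      rw [pvScanB_stay rest w0 c0 (fun p hp => hall p (List.mem_cons_of_mem _ hp))]
      exact hkc.1
    · rw [List.find?_cons_of_neg (by simpa using h0)] at hfind
      have hle : c0 ≤ M := hall (w0, c0) List.mem_cons_self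
      have hall' : ∀ p ∈ rest, p.2 ≤ M := fun p hp => hall p (List.mem_cons_of_mem _ hp)
      simp only [pvScanB]
      by_cases hbr : hc < c0
      · rw [if_pos hbr]
        exact ih w0 c0 M k c hfind hall' (by omega)
      · rw [if_neg hbr]
        exact ih mc hc M k c hfind hall' hlt

-- find? over the set of first occurrences = find? over the list
theorem find?_filter_ne (P : String → Bool) (x : String) (hPx : P x = false) :
    ∀ (l : List String), (l.filter (fun y => !(y == x))).find? P = l.find? P := by
  intro l
  induction l with
  | nil => rfl
  | cons a t ih =>
    by_cases hax : a = x
    · subst hax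
      rw [List.filter_cons_of_neg (by simp), List.find?_cons_of_neg (by simp [hPx])]
      exact ih
    · rw [List.filter_cons_of_pos (by simpa using hax)]
      by_cases hPa : P a = true
      · rw [List.find?_cons_of_pos hPa, List.find?_cons_of_pos hPa]
      · rw [List.find?_cons_of_neg (by simpa using hPa), List.find?_cons_of_neg (by simpa using hPa)]
        exact ih

theorem find?_ofList (P : String → Bool) : ∀ (xs : List String),
    (PySem.Set.ofList xs).find? P = xs.find? P := by
  intro xs
  induction xs with
  | nil => rfl
  | cons x t ih =>
    rw [PySem.Set.ofList_cons]
    by_cases hPx : P x = true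
    · rw [List.find?_cons_of_pos hPx, List.find?_cons_of_pos hPx]
    · have hPx' : P x = false := by simpa using hPx
      rw [List.find?_cons_of_neg (by simp [hPx']), List.find?_cons_of_neg (by simp [hPx'])]
      have hd : PySem.Set.discard (PySem.Set.ofList t) x
          = (PySem.Set.ofList t).filter (fun y => !(y == x)) := by
        simp [PySem.Set.discard]
      rw [hd, find?_filter_ne P x hPx', ih]

-- index characterization of find?
theorem find?_char (P : String → Bool) : ∀ (xs : List String) (w : String),
    xs.find? P = some w →
    ∃ i < xs.length, xs[i]! = w ∧ P w = true ∧ ∀ k < i, P xs[k]! = false := by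
  intro xs
  induction xs with
  | nil => intro w h; simp at h
  | cons a t ih =>
    intro w h
    by_cases hPa : P a = true
    · rw [List.find?_cons_of_pos hPa] at h
      obtain rfl : a = w := by injection h
      exact ⟨0, by simp, by simp, hPa, by omega⟩
    · have hPa' : P a = false := by simpa using hPa
      rw [List.find?_cons_of_neg (by simp [hPa'])] at h
      obtain ⟨i, hi, hiw, hPw, hmin⟩ := ih w h
      refine ⟨i + 1, by simp; omega, by simpa using hiw, hPw, ?_⟩
      intro k hk
      cases k with
      | zero => simpa using hPa'
      | succ k' =>
        have := hmin k' (by omega)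
        simpa using this

-- the two picked words on a non-empty word list
theorem pv_wordsA (ws : List String) (h : ws ≠ []) :
    ∃ j < ws.length, ws[j]! = pvLoopA PySem.Dict.empty "" 0 ws ∧
      (ws.take (j+1)).count ws[j]! = pvMaxCount ws ∧
      ∀ k < j, (ws.take (k+1)).count ws[k]! ≠ pvMaxCount ws := by
  have hd0 : ∀ v : String, (PySem.Dict.empty : PySem.Dict String Int).getD v 0 = (([] : List String).count v : Int) := by
    intro v; simp
  obtain ⟨ih1, _⟩ := pvMain ws PySem.Dict.empty PySem.Dict.empty [] "" 0 hd0 hd0 le_rfl (by intro v; simp)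
  have hpos : 0 < pvMaxrc [] ws := by
    cases hws : ws with
    | nil => exact absurd hws h
    | cons w t =>
      have := pvMaxrc_nonneg t [w]
      simp only [pvMaxrc]
      have h0 : (([] : List String).count w : Int) = 0 := by simp
      omega
  have hB := ih1 hpos
  obtain ⟨j, hj, hjw, hcnt, hmin⟩ := pvLoopB_char ws [] PySem.Dict.empty (pvMaxrc [] ws) _ hd0 hB
  have hmZ := pvMaxCount_eq_pvMaxrc ws h
  refine ⟨j, hj, hjw, ?_, ?_⟩
  · rw [← hmZ] at hcnt
    simp only [List.nil_append] at hcnt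
    rw [hjw]
    exact_mod_cast hcnt
  · intro k hk he
    have := hmin k hk
    rw [← hmZ] at this
    simp only [List.nil_append] at this
    exact this (by exact_mod_cast he)

theorem pv_wordsB (ws : List String) (h : ws ≠ []) :
    ∃ i < ws.length, ws[i]! = pvScanB "" 0
        ((ws.foldl (fun d w => d.insert w (d.getD w 0 + 1)) PySem.Dict.empty).items) ∧
      ws.count ws[i]! = pvMaxCount ws ∧
      ∀ k < i, ws.count ws[k]! ≠ pvMaxCount ws := by
  have hitems : (ws.foldl (fun d w => d.insert w (d.getD w 0 + 1)) PySem.Dict.empty).items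
      = (PySem.Set.ofList ws).map (fun k => (k, (ws.count k : Int))) := by
    rw [PySem.Dict.foldl_insert_getD_add_one_eq_counter, PySem.Dict.items_counter]
  obtain ⟨u, hu, heu⟩ := pvMaxCount_achieved ws h
  have hsome : (ws.find? (fun k => ((ws.count k : Int) == (pvMaxCount ws : Int)))).isSome :=
    List.find?_isSome.mpr ⟨u, hu, by simp [heu]⟩
  obtain ⟨wB, hwB⟩ := Option.isSome_iff_exists.mp hsome
  have hfindS : (PySem.Set.ofList ws).find? (fun k => ((ws.count k : Int) == (pvMaxCount ws : Int))) = some wB := by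
    rw [find?_ofList]; exact hwB
  have hfmap : ((PySem.Set.ofList ws).map (fun k => (k, (ws.count k : Int)))).find?
        (fun p => p.2 == (pvMaxCount ws : Int)) = some (wB, (ws.count wB : Int)) := by
    rw [List.find?_map]
    simpa [Function.comp] using congrArg (Option.map (fun k => (k, (ws.count k : Int)))) hfindS
  have hall : ∀ p ∈ (PySem.Set.ofList ws).map (fun k => (k, (ws.count k : Int))), p.2 ≤ (pvMaxCount ws : Int) := by
    intro p hp
    obtain ⟨k, hk, rfl⟩ := List.mem_map.mp hp
    have hkm : k ∈ ws := (PySem.Set.mem_ofList _ _).mp hk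
    have := le_pvMaxCount ws k hkm
    show ((ws.count k : Int)) ≤ (pvMaxCount ws : Int)
    exact_mod_cast this
  have hpos : (0 : Int) < (pvMaxCount ws : Int) := by
    have h1 : 1 ≤ ws.count u := List.count_pos_iff.mpr hu
    have := le_pvMaxCount ws u hu
    exact_mod_cast by omega
  have hscan : pvScanB "" 0 ((ws.foldl (fun d w => d.insert w (d.getD w 0 + 1)) PySem.Dict.empty).items) = wB := by
    rw [hitems]
    exact pvScanB_first_max _ "" 0 (pvMaxCount ws : Int) wB _ hfmap hall hpos
  obtain ⟨i, hi, hiw, hPw, hmin⟩ := find?_char _ ws wB hwB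
  refine ⟨i, hi, by rw [hiw, hscan], ?_, ?_⟩
  · have hc : ((ws.count wB : Int)) = (pvMaxCount ws : Int) := by
      simpa using hPw
    rw [hiw]
    exact_mod_cast hc
  · intro k hk he
    have := hmin k hk
    rw [show ((ws.count ws[k]! : Int)) = ((pvMaxCount ws : Int)) from by exact_mod_cast he] at this
    simp at this

-- getElem!/idxOf/reverse toolbox
theorem pvGetBang (l : List String) (i : Nat) (h : i < l.length) : l[i]! = l[i] :=
  getElem!_pos l i h

theorem pvIdxOf_min : ∀ (l : List String) (k : Nat) (w : String), k < l.length → l[k]! = w → l.idxOf w ≤ k := by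
  intro l
  induction l with
  | nil => intro k w h _; simp at h
  | cons a t ih =>
    intro k w h he
    by_cases haw : a = w
    · subst haw; simp
    · cases k with
      | zero =>
        have : a = w := by simpa using he
        exact absurd this haw
      | succ k' =>
        have h' : k' < t.length := by simp at h; omega
        have he' : t[k']! = w := by simpa using he
        rw [show (a :: t).idxOf w = t.idxOf w + 1 from by simp [haw]]
        have := ih k' w h' he'
        omega

theorem pvCountSplit (l : List String) (n : Nat) (w : String) :
    l.count w = (l.take n).count w + (l.drop n).count w := by
  conv_lhs => rw [← List.take_append_drop n l]
  rw [List.count_append]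

theorem pvDropIdx (l : List String) (n i : Nat) (h : n + i < l.length) :
    (l.drop n)[i]! = l[n + i]! := by
  have h1 : i < (l.drop n).length := by simp; omega
  rw [pvGetBang _ _ h1, pvGetBang _ _ h]
  simp

theorem pvTake_noAfter (l : List String) (p : Nat) (w : String)
    (h : (l.take (p+1)).count w = l.count w) :
    ∀ k, p < k → k < l.length → l[k]! ≠ w := by
  intro k hk1 hk2 he
  have hz : (l.drop (p+1)).count w = 0 := by
    have := pvCountSplit l (p+1) w
    omega
  have hmem : w ∈ l.drop (p+1) := by
    have hlen : p + 1 + (k - (p+1)) < l.length := by omega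
    have := pvDropIdx l (p+1) (k - (p+1)) hlen
    rw [show p + 1 + (k - (p+1)) = k from by omega] at this
    rw [he] at this
    have h1 : k - (p+1) < (l.drop (p+1)).length := by simp; omega
    rw [pvGetBang _ _ h1] at this
    exact this ▸ (l.drop (p+1)).getElem_mem h1
  rw [List.count_eq_zero] at hz
  exact hz hmem

theorem pvNoAfter_take (l : List String) (p : Nat) (w : String)
    (h : ∀ k, p < k → k < l.length → l[k]! ≠ w) : (l.take (p+1)).count w = l.count w := by
  have hz : (l.drop (p+1)).count w = 0 := by
    rw [List.count_eq_zero]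
    intro hmem
    obtain ⟨i, hi, he⟩ := List.mem_iff_getElem.mp hmem
    have hilen : i < l.length - (p+1) := by simpa using hi
    have hlen : p + 1 + i < l.length := by omega
    refine h (p + 1 + i) (by omega) hlen ?_
    rw [← pvDropIdx l (p+1) i hlen, pvGetBang _ _ hi]
    exact he
  have := pvCountSplit l (p+1) w
  omega

-- the reverse idxOf of w names the LAST occurrence of w
theorem pvRev (l : List String) (w : String) (hw : w ∈ l) :
    l.reverse.idxOf w < l.length ∧ l[l.length - 1 - l.reverse.idxOf w]! = w ∧
    ∀ k, l.length - 1 - l.reverse.idxOf w < k → k < l.length → l[k]! ≠ w := by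
  have hwr : w ∈ l.reverse := by simpa using hw
  have hr : l.reverse.idxOf w < l.reverse.length := List.idxOf_lt_length_of_mem hwr
  have hrlen : l.reverse.length = l.length := by simp
  refine ⟨by omega, ?_, ?_⟩
  · have h1 : l.reverse[l.reverse.idxOf w] = w := List.getElem_idxOf hr
    rw [List.getElem_reverse] at h1
    rw [pvGetBang _ _ (by simp at hr ⊢; omega)]
    simpa using h1
  · intro k hk1 hk2 he
    have hbk : l.length - 1 - k < l.reverse.length := by omega
    have hrk : l.reverse[l.length - 1 - k]! = l[k]! := by
      rw [pvGetBang _ _ hbk, pvGetBang _ _ hk2, List.getElem_reverse]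
      congr 1
      omega
    have hmin : l.reverse.idxOf w ≤ l.length - 1 - k :=
      pvIdxOf_min l.reverse _ w hbk (by rw [hrk]; exact he)
    omega

-- A's returned word: maximal count, and earliest LAST occurrence among the tied words
theorem pv_uvA (ws : List String) (h : ws ≠ []) :
    pvLoopA PySem.Dict.empty "" 0 ws ∈ ws ∧
    ws.count (pvLoopA PySem.Dict.empty "" 0 ws) = pvMaxCount ws ∧
    ∀ w ∈ ws, ws.count w = pvMaxCount ws →
      ws.reverse.idxOf w ≤ ws.reverse.idxOf (pvLoopA PySem.Dict.empty "" 0 ws) := by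
  obtain ⟨j, hj, hjw, hjc, hjmin⟩ := pv_wordsA ws h
  rw [hjw] at hjc
  have hmemA : pvLoopA PySem.Dict.empty "" 0 ws ∈ ws := by
    rw [← hjw, pvGetBang _ _ hj]; exact ws.getElem_mem hj
  have hcntA : ws.count (pvLoopA PySem.Dict.empty "" 0 ws) = pvMaxCount ws := by
    have h1 := pvCountSplit ws (j+1) (pvLoopA PySem.Dict.empty "" 0 ws)
    have h2 := le_pvMaxCount ws _ hmemA
    omega
  obtain ⟨hrA_lt, hrA_get, hrA_no⟩ := pvRev ws _ hmemA
  have hposA : ws.length - 1 - ws.reverse.idxOf (pvLoopA PySem.Dict.empty "" 0 ws) = j := by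
    have hple : ws.length - 1 - ws.reverse.idxOf (pvLoopA PySem.Dict.empty "" 0 ws) ≤ j := by
      by_contra hgt
      exact pvTake_noAfter ws j _ (hjc.trans hcntA.symm) _ (by omega) (by omega) hrA_get
    by_contra hne
    exact hrA_no j (by omega) hj hjw
  refine ⟨hmemA, hcntA, ?_⟩
  intro w hw htied
  obtain ⟨hrw_lt, hrw_get, hrw_no⟩ := pvRev ws w hw
  have hrun : (ws.take ((ws.length - 1 - ws.reverse.idxOf w) + 1)).count
      ws[ws.length - 1 - ws.reverse.idxOf w]! = pvMaxCount ws := by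
    rw [hrw_get, pvNoAfter_take ws _ w hrw_no, htied]
  have hjq : j ≤ ws.length - 1 - ws.reverse.idxOf w := by
    by_contra hlt
    exact hjmin _ (by omega) hrun
  omega

-- B's returned word: maximal count, and earliest FIRST occurrence among the tied words
theorem pv_uvB (ws : List String) (h : ws ≠ []) :
    pvScanB "" 0 ((ws.foldl (fun d w => d.insert w (d.getD w 0 + 1)) PySem.Dict.empty).items) ∈ ws ∧
    ws.count (pvScanB "" 0 ((ws.foldl (fun d w => d.insert w (d.getD w 0 + 1)) PySem.Dict.empty).items)) = pvMaxCount ws ∧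
    ∀ w ∈ ws, ws.count w = pvMaxCount ws →
      ws.idxOf (pvScanB "" 0 ((ws.foldl (fun d w => d.insert w (d.getD w 0 + 1)) PySem.Dict.empty).items)) ≤ ws.idxOf w := by
  obtain ⟨i, hi, hiw, hic, himin⟩ := pv_wordsB ws h
  rw [hiw] at hic
  have hmemB : pvScanB "" 0 ((ws.foldl (fun d w => d.insert w (d.getD w 0 + 1)) PySem.Dict.empty).items) ∈ ws := by
    rw [← hiw, pvGetBang _ _ hi]; exact ws.getElem_mem hi
  refine ⟨hmemB, hic, ?_⟩
  intro w hw htied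
  have h1 : ws.idxOf (pvScanB "" 0 ((ws.foldl (fun d w => d.insert w (d.getD w 0 + 1)) PySem.Dict.empty).items)) ≤ i :=
    pvIdxOf_min ws i _ hi hiw
  have hk : ws.idxOf w < ws.length := List.idxOf_lt_length_of_mem hw
  have h2 : ws[ws.idxOf w]! = w := by rw [pvGetBang _ _ hk]; exact List.getElem_idxOf hk
  have h3 : i ≤ ws.idxOf w := by
    by_contra hlt
    exact himin (ws.idxOf w) (by omega) (by rw [h2]; exact htied)
  omega

-- two elements sharing the same (minimal) idxOf are equal
theorem pv_idx_eq (l : List String) (u u' : String) (hu : u ∈ l) (hu' : u' ∈ l)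
    (h1 : l.idxOf u ≤ l.idxOf u') (h2 : l.idxOf u' ≤ l.idxOf u) : u = u' := by
  have hlu := List.idxOf_lt_length_of_mem hu
  have hlu' := List.idxOf_lt_length_of_mem hu'
  have g1 : l[l.idxOf u]! = u := by rw [pvGetBang _ _ hlu]; exact List.getElem_idxOf hlu
  have g2 : l[l.idxOf u']! = u' := by rw [pvGetBang _ _ hlu']; exact List.getElem_idxOf hlu'
  rw [← g1, ← g2, le_antisymm h1 h2]

-- ===== VERDICT (by name: the statement is the Claim_ definition above) =====
theorem identify_most_common_word_spec : Claim_unchanged_identify_most_common_word := by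
  unfold Claim_unchanged_identify_most_common_word
  intro paragraph _
  unfold Spec_identify_most_common_word
  intro hnD
  cases paragraph with
  | none => rfl
  | some s =>
    simp only [identify_most_common_word, identify_most_common_word_alt]
    by_cases hs : s = ""
    · simp [hs]
    · rw [if_neg hs, if_neg hs]
      by_cases hws : PySem.Str.split₀ s = []
      · rw [hws]
        rfl
      · obtain ⟨hmemA, hcntA, hlastA⟩ := pv_uvA _ hws
        obtain ⟨hmemB, hcntB, hfirstB⟩ := pv_uvB _ hws
        have heq : pvLoopA PySem.Dict.empty "" 0 (PySem.Str.split₀ s)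
            = pvScanB "" 0 (((PySem.Str.split₀ s).foldl (fun d w => d.insert w (d.getD w 0 + 1)) PySem.Dict.empty).items) := by
          by_contra hne
          have hrlt : (PySem.Str.split₀ s).reverse.idxOf
                (pvScanB "" 0 (((PySem.Str.split₀ s).foldl (fun d w => d.insert w (d.getD w 0 + 1)) PySem.Dict.empty).items))
              < (PySem.Str.split₀ s).reverse.idxOf (pvLoopA PySem.Dict.empty "" 0 (PySem.Str.split₀ s)) := by
            have hle := hlastA _ hmemB hcntB
            rcases lt_or_eq_of_le hle with hlt | heq2
            · exact hlt
            · exact absurd (pv_idx_eq (PySem.Str.split₀ s).reverse _ _ (by simpa using hmemB)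
                (by simpa using hmemA) (le_of_eq heq2) (le_of_eq heq2.symm)).symm hne
          refine hnD ⟨_, hmemB, _, hmemA, hcntB.trans hcntA.symm, hrlt, ?_⟩
          intro w hw
          exact ⟨hcntB ▸ le_pvMaxCount _ w hw, fun htied => hfirstB w hw (htied.trans hcntB)⟩
        rw [heq]

theorem identify_most_common_word_changed : Claim_changed_identify_most_common_word := by
  unfold Claim_changed_identify_most_common_word; decide

theorem identify_most_common_word_tight : Claim_exact_identify_most_common_word := by
  unfold Claim_exact_identify_most_common_word
  intro paragraph _ hD
  cases paragraph with
  | none =>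
    obtain ⟨u, hu, -⟩ := hD
    have h0 : PySem.Str.split₀ (Option.iget (none : Option String)) = [] := rfl
    rw [h0] at hu
    simp at hu
  | some s =>
    obtain ⟨u, hu, v, hv, hcuv, hrlt, hall⟩ := hD
    have hws : PySem.Str.split₀ s ≠ [] := List.ne_nil_of_mem hu
    have hs : s ≠ "" := by
      intro h0; subst h0; exact hws rfl
    obtain ⟨hmemA, hcntA, hlastA⟩ := pv_uvA _ hws
    obtain ⟨hmemB, hcntB, hfirstB⟩ := pv_uvB _ hws
    have hum : (PySem.Str.split₀ s).count u = pvMaxCount (PySem.Str.split₀ s) := by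
      refine le_antisymm (le_pvMaxCount _ u hu) ?_
      obtain ⟨w0, hw0, he0⟩ := pvMaxCount_achieved _ hws
      rw [he0]
      exact (hall w0 hw0).1
    have hvm : (PySem.Str.split₀ s).count v = pvMaxCount (PySem.Str.split₀ s) := hcuv.symm.trans hum
    have huB : u = pvScanB "" 0 (((PySem.Str.split₀ s).foldl (fun d w => d.insert w (d.getD w 0 + 1)) PySem.Dict.empty).items) :=
      pv_idx_eq _ u _ hu hmemB
        ((hall _ hmemB).2 (hcntB.trans hum.symm))
        (hfirstB u hu hum)
    simp only [identify_most_common_word, identify_most_common_word_alt, if_neg hs]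
    intro hcontra
    have h1 := Option.some.inj hcontra
    -- then A's word = B's word = u, contradicting that v's occurrences end strictly earlier
    have h2 := hlastA v hv hvm
    have h3 : (PySem.Str.split₀ s).reverse.idxOf u < (PySem.Str.split₀ s).reverse.idxOf v := hrlt
    rw [h1, ← huB] at h2
    omega
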